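-- pv_equiv track=rewrite | github.com/slowikj/Mishka-and-interesting-sum | bruteforce/mishka.py | answer_for_query
-- ===== SOURCE A (Python) =====
-- from functools import reduce
--
-- def answer_for_query(numbers, query):
-- 	res = 0
--
-- 	occurences={}
-- 	for i in range(query[0], query[1] + 1):
-- 		if (numbers[i] in occurences):
-- 			occurences[numbers[i]] += 1
-- 		else:
-- 		 	occurences[numbers[i]] = 1
--
-- 	return reduce((lambda x, y: x ^ y[0]),
-- 				  list(filter((lambda x: x[1] % 2 == 0),
-- 							  occurences.items())),
-- 				  0);
-- ===== SOURCE B (Python) =====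
-- def answer_for_query(numbers, query):
-- 	all_xor = 0
-- 	seen = set()
-- 	for i in range(query[0], query[1] + 1):
-- 		v = numbers[i]
-- 		all_xor ^= v
-- 		seen.add(v)
-- 	distinct_xor = 0
-- 	for v in seen:
-- 		distinct_xor ^= v
-- 	return all_xor ^ distinct_xor
-- ===== Notes on version B (the rewrite author's own statement) =====
-- stated objective: simpler
-- what changed: B drops A's occurrence-count dict and parity filter entirely, using the identity 'xor of even-count values = xor of all range elements ^ xor of the distinct range elements': one pass folds every element into an accumulator and a set, then the set is xor-folded.
import Mathlib
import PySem

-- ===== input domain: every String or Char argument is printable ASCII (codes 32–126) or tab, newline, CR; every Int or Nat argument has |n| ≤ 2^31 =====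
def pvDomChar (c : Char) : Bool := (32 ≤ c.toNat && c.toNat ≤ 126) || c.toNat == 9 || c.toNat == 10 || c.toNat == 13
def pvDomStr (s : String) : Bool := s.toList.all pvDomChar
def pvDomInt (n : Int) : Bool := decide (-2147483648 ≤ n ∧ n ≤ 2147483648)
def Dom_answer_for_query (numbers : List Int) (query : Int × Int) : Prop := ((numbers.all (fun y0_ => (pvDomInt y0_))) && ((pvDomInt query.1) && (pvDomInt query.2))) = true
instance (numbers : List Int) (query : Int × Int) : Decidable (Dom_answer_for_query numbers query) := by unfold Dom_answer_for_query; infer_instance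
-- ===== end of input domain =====

-- B replaces A's occurrence-count dict and parity filter by the identity
-- "XOR of even-count values = XOR of all elements ^ XOR of distinct elements"
-- (one xor accumulator plus a set); same asymptotic cost, simpler decomposition.

-- ===== PORT A =====
def answer_for_query (numbers : List Int) (query : Int × Int) : Int :=
  let occurences : PySem.Dict Int Int :=
    (PySem.List.pyRange query.1 (query.2 + 1) 1).foldl
      (fun d i =>
        if d.contains (PySem.List.pyGetD numbers i 0) then
          d.insert (PySem.List.pyGetD numbers i 0)
            (d.getD (PySem.List.pyGetD numbers i 0) 0 + 1)
        else
          d.insert (PySem.List.pyGetD numbers i 0) 1)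
      PySem.Dict.empty
  (occurences.items.filter (fun p => PySem.Int.mod p.2 2 == 0)).foldl
    (fun x y => PySem.Int.bxor x y.1) 0

-- ===== PORT B =====
def answer_for_query_alt (numbers : List Int) (query : Int × Int) : Int :=
  let st :=
    (PySem.List.pyRange query.1 (query.2 + 1) 1).foldl
      (fun s i =>
        (PySem.Int.bxor s.1 (PySem.List.pyGetD numbers i 0),
         PySem.Set.add s.2 (PySem.List.pyGetD numbers i 0)))
      ((0 : Int), (PySem.Set.empty : PySem.Set Int))
  PySem.Int.bxor st.1 (st.2.foldl (fun a v => PySem.Int.bxor a v) 0)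

-- ===== PRECONDITION & SPEC =====
-- Pre_ excludes exactly the queries whose index range reaches outside the list
-- (Python's numbers[i] raises IndexError there); negative in-range indices wrap as in Python.
def Pre_answer_for_query (numbers : List Int) (query : Int × Int) : Prop :=
  query.2 < query.1 ∨
    (-(numbers.length : Int) ≤ query.1 ∧ query.2 < (numbers.length : Int))
instance (numbers : List Int) (query : Int × Int) : Decidable (Pre_answer_for_query numbers query) := by
  unfold Pre_answer_for_query; infer_instance

def pvWitness_answer_for_query : List Int × (Int × Int) := ([1, 2, 2, 3], (1, 3))

def Spec_answer_for_query (numbers : List Int) (query : Int × Int) (out : Int) : Prop := out = answer_for_query_alt numbers query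
instance (numbers : List Int) (query : Int × Int) (out : Int) : Decidable (Spec_answer_for_query numbers query out) := by unfold Spec_answer_for_query; infer_instance

-- ===== CLAIM (what is proved, stated in full; the proofs are below) =====
def Claim_equal_answer_for_query : Prop := ∀ (numbers : List Int) (query : Int × Int), Dom_answer_for_query numbers query → Pre_answer_for_query numbers query → Spec_answer_for_query numbers query (answer_for_query numbers query)

-- ===== LEMMAS AND PROOFS =====

-- Two's-complement encoding of an Int: enc m false = m, enc m true = -m-1.
def pvEnc (m : Nat) (s : Bool) : Int := if s then -(m : Int) - 1 else (m : Int)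

theorem pvBxor_enc (m n : Nat) (s t : Bool) :
    PySem.Int.bxor (pvEnc m s) (pvEnc n t) = pvEnc (m ^^^ n) (s != t) := by
  have h3 : (0 : Int) ≤ (m : Int) := by omega
  have h4 : (0 : Int) ≤ (n : Int) := by omega
  have h5 : ¬ (1 : Int) ≤ -(m : Int) := by omega
  have h6 : ¬ (1 : Int) ≤ -(n : Int) := by omega
  cases s <;> cases t <;>
    simp [PySem.Int.bxor, pvEnc, h3, h4, h5, h6]

theorem pvEnc_surj (a : Int) :
    a = pvEnc (if a < 0 then (-a).toNat - 1 else a.toNat) (decide (a < 0)) := by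
  by_cases h : a < 0 <;> simp [pvEnc, h] <;> omega

theorem pvBxor_assoc (a b c : Int) :
    PySem.Int.bxor (PySem.Int.bxor a b) c = PySem.Int.bxor a (PySem.Int.bxor b c) := by
  rw [pvEnc_surj a, pvEnc_surj b, pvEnc_surj c, pvBxor_enc, pvBxor_enc, pvBxor_enc,
    pvBxor_enc, Nat.xor_assoc]
  cases decide (a < 0) <;> cases decide (b < 0) <;> cases decide (c < 0) <;> rfl

-- X l = fold of bxor over l from 0 (the canonical "xor of a list").
def pvX (l : List Int) : Int := l.foldl PySem.Int.bxor 0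

theorem pvX_hoist (l : List Int) (a : Int) :
    l.foldl PySem.Int.bxor a = PySem.Int.bxor a (pvX l) := by
  induction l generalizing a with
  | nil => simp [pvX, PySem.Int.bxor_zero]
  | cons x t ih =>
      simp only [pvX, List.foldl_cons] at *
      rw [ih, ih (PySem.Int.bxor 0 x), pvBxor_assoc]
      rw [PySem.Int.bxor_comm 0 x, PySem.Int.bxor_zero]

theorem pvX_cons (x : Int) (l : List Int) :
    pvX (x :: l) = PySem.Int.bxor x (pvX l) := by
  simp only [pvX, List.foldl_cons]
  rw [pvX_hoist, PySem.Int.bxor_comm 0 x, PySem.Int.bxor_zero]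
  rfl

theorem pvX_append (l m : List Int) :
    pvX (l ++ m) = PySem.Int.bxor (pvX l) (pvX m) := by
  simp only [pvX, List.foldl_append]
  rw [pvX_hoist]
  rfl

theorem pvX_perm {l l' : List Int} (h : l.Perm l') : pvX l = pvX l' :=
  @List.Perm.foldl_eq _ _ _ _ _
    ⟨fun a b c => by
      rw [pvBxor_assoc, pvBxor_assoc, PySem.Int.bxor_comm b c]⟩ h 0

-- Toggling a predicate at one element v of a nodup list changes the filtered xor by v.
theorem pvX_toggle (l : List Int) (v : Int) (p q : Int → Bool)
    (hnd : l.Nodup) (hv : v ∈ l)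
    (hq : ∀ k, q k = if k = v then !(p k) else p k) :
    pvX (l.filter q) = PySem.Int.bxor v (pvX (l.filter p)) := by
  induction l with
  | nil => cases hv
  | cons a t ih =>
      have hnd' : t.Nodup := (List.nodup_cons.mp hnd).2
      have hna : a ∉ t := (List.nodup_cons.mp hnd).1
      by_cases hav : a = v
      · subst hav
        have hft : t.filter q = t.filter p := by
          apply List.filter_congr
          intro x hx
          rw [hq x, if_neg (by rintro rfl; exact hna hx)]
        rw [List.filter_cons, List.filter_cons, hft, hq a, if_pos rfl]
        cases hpa : p a
        · simp only [hpa, Bool.not_false, Bool.false_eq_true, if_false, if_true]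
          exact pvX_cons a _
        · simp only [hpa, Bool.not_true, Bool.false_eq_true, if_false, if_true]
          rw [pvX_cons, ← pvBxor_assoc, PySem.Int.bxor_self,
            PySem.Int.bxor_comm 0, PySem.Int.bxor_zero]
      · have hvt : v ∈ t := by
          rcases List.mem_cons.mp hv with h | h
          · exact absurd h.symm hav
          · exact h
        have hqa : q a = p a := by rw [hq a, if_neg hav]
        rw [List.filter_cons, List.filter_cons, hqa]
        cases hpa : p a
        · simp only [hpa, Bool.false_eq_true, if_false]
          exact ih hnd' hvt
        · simp only [hpa, if_true]
          rw [pvX_cons, pvX_cons, ih hnd' hvt, ← pvBxor_assoc, ← pvBxor_assoc,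
            PySem.Int.bxor_comm a v]

-- xor of a list = xor of its distinct values occurring an odd number of times.
theorem pvX_odd (vals : List Int) :
    pvX vals = pvX (vals.dedup.filter (fun k => decide (vals.count k % 2 = 1))) := by
  induction vals with
  | nil => simp
  | cons v t ih =>
      by_cases hv : v ∈ t
      · rw [List.dedup_cons_of_mem hv, pvX_cons]
        have htog :
            pvX (t.dedup.filter (fun k => decide ((v :: t).count k % 2 = 1))) =
              PySem.Int.bxor v
                (pvX (t.dedup.filter (fun k => decide (t.count k % 2 = 1)))) := by
          apply pvX_toggle t.dedup v _ _ t.nodup_dedup (List.mem_dedup.mpr hv)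
          intro k
          by_cases hkv : k = v
          · subst hkv
            rw [if_pos rfl, List.count_cons, if_pos (by simp)]
            rcases Nat.even_or_odd (t.count k) with he | ho
            · have h0 : t.count k % 2 = 0 := Nat.even_iff.mp he
              simp [Nat.add_mod, h0]
            · have h1 : t.count k % 2 = 1 := Nat.odd_iff.mp ho
              simp [Nat.add_mod, h1]
          · rw [if_neg hkv, List.count_cons,
              if_neg (by simp only [beq_iff_eq]; exact fun h => hkv h.symm),
              Nat.add_zero]
        rw [htog, ← ih]
      · rw [List.dedup_cons_of_notMem hv, pvX_cons]
        have hfc : (v :: t.dedup).filter (fun k => decide ((v :: t).count k % 2 = 1)) =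
            v :: t.dedup.filter (fun k => decide (t.count k % 2 = 1)) := by
          rw [List.filter_cons, if_pos (by
            simp [List.count_eq_zero_of_not_mem hv])]
          congr 1
          apply List.filter_congr
          intro x hx
          have hxv : ¬ (v == x) = true := by
            simp only [beq_iff_eq]
            rintro rfl
            exact hv (List.mem_dedup.mp hx)
          rw [List.count_cons, if_neg hxv, Nat.add_zero]
        rw [hfc, pvX_cons, ← ih]

-- The values the loop of either port visits.
def pvVals (numbers : List Int) (query : Int × Int) : List Int :=
  (PySem.List.pyRange query.1 (query.2 + 1) 1).map
    (fun i => PySem.List.pyGetD numbers i 0)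

-- A's result: xor of the distinct values with even count.
theorem pvA_eq (numbers : List Int) (query : Int × Int) :
    answer_for_query numbers query =
      pvX ((PySem.Set.ofList (pvVals numbers query)).filter
        (fun k => decide ((pvVals numbers query).count k % 2 = 0))) := by
  simp only [answer_for_query]
  have hfold :
      (PySem.List.pyRange query.1 (query.2 + 1) 1).foldl
        (fun d i =>
          if d.contains (PySem.List.pyGetD numbers i 0) then
            d.insert (PySem.List.pyGetD numbers i 0)
              (d.getD (PySem.List.pyGetD numbers i 0) 0 + 1)
          else
            d.insert (PySem.List.pyGetD numbers i 0) 1)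
        PySem.Dict.empty =
      PySem.Dict.counter (pvVals numbers query) := by
    rw [← PySem.Dict.foldl_insert_getD_add_one_eq_counter, pvVals, List.foldl_map]
    apply PySem.List.foldl_congr_mem
    intro d i _
    by_cases hc : d.contains (PySem.List.pyGetD numbers i 0)
    · rw [if_pos hc]
    · rw [if_neg hc,
        PySem.Dict.getD_of_not_contains d 0 (Bool.not_eq_true _ ▸ hc)]
      norm_num
  rw [hfold, PySem.Dict.items_counter, List.filter_map]
  have hmap :
      List.map (fun k => (k, ((pvVals numbers query).count k : Int)))
        (((PySem.Set.ofList (pvVals numbers query)).filter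
          ((fun p => PySem.Int.mod p.2 2 == 0) ∘
            fun k => (k, ((pvVals numbers query).count k : Int))))) =
      List.map (fun k => (k, ((pvVals numbers query).count k : Int)))
        ((PySem.Set.ofList (pvVals numbers query)).filter
          (fun k => decide ((pvVals numbers query).count k % 2 = 0))) := by
    congr 1
    apply List.filter_congr
    intro x _
    simp only [Function.comp]
    have hm : PySem.Int.mod ((List.count x (pvVals numbers query) : Int)) 2
        = ((List.count x (pvVals numbers query) % 2 : Nat) : Int) := by
      exact_mod_cast PySem.Int.mod_natCast _ 2
    rw [hm]
    by_cases h : List.count x (pvVals numbers query) % 2 = 0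
    · simp [h]
    · simp only [h, decide_false, beq_eq_false_iff_ne, ne_eq]
      exact_mod_cast h
  rw [hmap, List.foldl_map]
  rfl

-- B's result: xor of all values, xor the xor of the distinct values.
theorem pvB_eq (numbers : List Int) (query : Int × Int) :
    answer_for_query_alt numbers query =
      PySem.Int.bxor (pvX (pvVals numbers query))
        (pvX (PySem.Set.ofList (pvVals numbers query))) := by
  simp only [answer_for_query_alt]
  rw [PySem.List.foldl_prod_mk
    (f := fun a i => PySem.Int.bxor a (PySem.List.pyGetD numbers i 0))
    (g := fun s i => PySem.Set.add s (PySem.List.pyGetD numbers i 0))]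
  simp only [pvX, pvVals, PySem.Set.ofList_eq_foldl, List.foldl_map]
  rfl

-- Main identity on an arbitrary value list.
theorem pvMain (vals : List Int) :
    pvX ((PySem.Set.ofList vals).filter (fun k => decide (vals.count k % 2 = 0))) =
      PySem.Int.bxor (pvX vals) (pvX (PySem.Set.ofList vals)) := by
  set S := PySem.Set.ofList vals with hS
  set oddP : Int → Bool := fun k => decide (vals.count k % 2 = 1) with hodd
  have hperm : vals.dedup.Perm S := by
    rw [List.perm_ext_iff_of_nodup vals.nodup_dedup (PySem.Set.nodup_ofList vals)]
    intro a
    rw [List.mem_dedup]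
    exact (PySem.Set.mem_ofList vals a).symm
  have hXvals : pvX vals = pvX (S.filter oddP) := by
    rw [pvX_odd vals]
    exact pvX_perm (hperm.filter oddP)
  have hsplit : pvX S =
      PySem.Int.bxor (pvX (S.filter oddP)) (pvX (S.filter (fun k => !oddP k))) := by
    rw [← pvX_append]
    exact (pvX_perm (List.filter_append_perm oddP S)).symm
  have hfe : S.filter (fun k => !oddP k) =
      S.filter (fun k => decide (vals.count k % 2 = 0)) := by
    apply List.filter_congr
    intro x _
    simp only [hodd]
    rcases Nat.even_or_odd (vals.count x) with he | ho
    · simp [Nat.even_iff.mp he]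
    · simp [Nat.odd_iff.mp ho]
  rw [hXvals, hsplit, hfe, ← pvBxor_assoc, PySem.Int.bxor_self,
    PySem.Int.bxor_comm 0, PySem.Int.bxor_zero]

-- ===== VERDICT (by name: the statement is the Claim_ definition above) =====
theorem answer_for_query_spec : Claim_equal_answer_for_query := by
  intro numbers query _ _
  unfold Spec_answer_for_query
  rw [pvA_eq, pvB_eq, pvMain]
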